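-- pv_equiv track=rewrite | github.com/Fethbita/eMRTD_face_access | emrtd_face_access/asn1.py | encode_variable_length_quantity
-- ===== SOURCE A (Python) =====
-- from typing import List
--
-- def encode_variable_length_quantity(v: int) -> List[int]:
--     """
--     Break it up in groups of 7 bits starting from the lowest significant bit
--     For all the other groups of 7 bits than lowest one, set the MSB to 1
--     """
--     m = 0x00
--     output: List[int] = []
--     while v >= 0x80:
--         output.insert(0, (v & 0x7F) | m)
--         v = v >> 7
--         m = 0x80
--     output.insert(0, v | m)
--     return output
-- ===== SOURCE B (Python) =====
-- from typing import List
--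
-- def encode_variable_length_quantity(v: int) -> List[int]:
--     # Single-byte values (including 0 and negatives) need no grouping.
--     if v < 0x80:
--         return [v]
--     # Precompute the group count, then emit groups high-to-low by direct
--     # closed-form extraction (no shift-and-prepend loop).
--     nbytes = (v.bit_length() + 6) // 7
--     out: List[int] = []
--     for i in range(nbytes - 1, -1, -1):
--         out.append(((v >> (7 * i)) & 0x7F) | (0x80 if i else 0))
--     return out
-- ===== Notes on version B (the rewrite author's own statement) =====
-- stated objective: alternative
-- what changed: Replaces A's low-to-high shift-and-prepend while-loop (insert(0,...) with a mutating mask variable) by a guard for single-byte values plus a precomputed group count from bit_length and a high-to-low for-loop that extracts each 7-bit group in closed form and appends it.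
import Mathlib
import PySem

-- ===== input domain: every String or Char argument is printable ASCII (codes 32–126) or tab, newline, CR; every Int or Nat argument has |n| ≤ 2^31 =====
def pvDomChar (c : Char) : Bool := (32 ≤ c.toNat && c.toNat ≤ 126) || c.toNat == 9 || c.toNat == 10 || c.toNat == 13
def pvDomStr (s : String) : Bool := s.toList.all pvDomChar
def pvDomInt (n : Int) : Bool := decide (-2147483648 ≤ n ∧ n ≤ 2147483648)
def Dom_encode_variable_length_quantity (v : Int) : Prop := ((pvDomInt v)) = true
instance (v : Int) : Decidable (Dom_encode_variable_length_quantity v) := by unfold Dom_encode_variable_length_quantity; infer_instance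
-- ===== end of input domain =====

-- B replaces A's low-to-high shift-and-prepend while-loop by a single-byte guard plus a
-- precomputed group count (bit_length) and a high-to-low append loop with closed-form
-- group extraction; same return value on every int (objective: alternative decomposition).

-- ===== PORT A =====
-- the while-loop of A: state (v, m, output), insert(0, x) = x :: output
def pvEvlqLoop (v : Int) (m : Int) (output : List Int) : List Int :=
  if _h : (0x80:Int) ≤ v then
    pvEvlqLoop (v >>> (7:Nat)) 0x80 ((PySem.Int.bor (PySem.Int.band v 0x7F) m) :: output)
  else
    (PySem.Int.bor v m) :: output
termination_by v.toNat
decreasing_by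
  have : v >>> (7:Nat) = v / 128 := by rw [Int.shiftRight_eq_div_pow]; norm_num
  omega

def encode_variable_length_quantity (v : Int) : List Int :=
  pvEvlqLoop v 0x00 []

-- ===== PORT B =====
def encode_variable_length_quantity_alt (v : Int) : List Int :=
  if v < 0x80 then [v]
  else
    let nbytes : Int := PySem.Int.floordiv ((PySem.Int.bitLength v : Int) + 6) 7
    (PySem.List.pyRange (nbytes - 1) (-1) (-1)).foldl
      (fun out i =>
        out ++ [PySem.Int.bor (PySem.Int.band (v >>> (7 * i).toNat) 0x7F)
                  (if i ≠ 0 then 0x80 else 0)]) []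

-- ===== PRECONDITION & SPEC =====
def Spec_encode_variable_length_quantity (v : Int) (out : List Int) : Prop := out = encode_variable_length_quantity_alt v
instance (v : Int) (out : List Int) : Decidable (Spec_encode_variable_length_quantity v out) := by unfold Spec_encode_variable_length_quantity; infer_instance

-- ===== CLAIM (what is proved, stated in full; the proofs are below) =====
def Claim_equal_encode_variable_length_quantity : Prop := ∀ (v : Int), Dom_encode_variable_length_quantity v → Spec_encode_variable_length_quantity v (encode_variable_length_quantity v)

-- ===== LEMMAS AND PROOFS =====

-- i-th 7-bit group of n, from the low end
def pvGrp (n i : Nat) : Nat := (n >>> (7 * i)) &&& 127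

-- canonical output: k groups, high to low; the lowest group carries mask m, others 0x80
def pvCanon (n k m : Nat) : List Int :=
  (List.range k).reverse.map (fun i => ((pvGrp n i ||| (if i = 0 then m else 128) : Nat) : Int))

-- number of 7-bit groups A's loop produces
def pvGcount (n : Nat) : Nat :=
  if h : n < 128 then 1 else pvGcount (n >>> 7) + 1
termination_by n
decreasing_by
  have : n >>> 7 = n / 128 := by rw [Nat.shiftRight_eq_div_pow]
  omega

lemma pvGrp_zero (n : Nat) : pvGrp n 0 = n &&& 127 := by simp [pvGrp]

lemma pvGrp_succ (n i : Nat) : pvGrp n (i + 1) = pvGrp (n >>> 7) i := by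
  have : 7 * (i + 1) = 7 + 7 * i := by ring
  simp [pvGrp, this, Nat.shiftRight_add]

lemma pvCanon_succ (n k m : Nat) :
    pvCanon n (k + 1) m = pvCanon (n >>> 7) k 128 ++ [((pvGrp n 0 ||| m : Nat) : Int)] := by
  simp only [pvCanon, List.range_succ_eq_map, List.reverse_cons, List.map_append,
    List.map_map, List.map_cons, List.map_nil, List.map_reverse]
  congr 1
  · congr 1
    apply List.map_congr_left
    intro i _
    simp [Function.comp, pvGrp_succ]

-- A's loop computes the canonical list (prepended to the running output)
lemma pvEvlqLoop_eq (n : Nat) : ∀ (m : Nat) (out : List Int),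
    pvEvlqLoop (n : Int) (m : Int) out = pvCanon n (pvGcount n) m ++ out := by
  induction n using Nat.strong_induction_on with
  | _ n ih =>
    intro m out
    rw [pvEvlqLoop]
    by_cases h : 128 ≤ n
    · rw [dif_pos (by exact_mod_cast h)]
      have hsh : (n : Int) >>> (7:Nat) = ((n >>> 7 : Nat) : Int) :=
        (Int.natCast_shiftRight n 7).symm
      have hb : PySem.Int.bor (PySem.Int.band (n : Int) 0x7F) (m : Int)
          = (((n &&& 127) ||| m : Nat) : Int) := by
        rw [show (0x7F:Int) = ((127:Nat):Int) by norm_num, PySem.Int.band_natCast,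
          PySem.Int.bor_natCast]
      have hlt : n >>> 7 < n := by
        have hd : n >>> 7 = n / 128 := by rw [Nat.shiftRight_eq_div_pow]
        omega
      rw [hsh, hb, show ((0x80:Int)) = ((128:Nat):Int) by norm_num, ih _ hlt 128]
      have hg : pvGcount n = pvGcount (n >>> 7) + 1 := by
        rw [pvGcount]; simp [show ¬ n < 128 by omega]
      rw [hg, pvCanon_succ, pvGrp_zero]
      simp
    · rw [dif_neg (by exact_mod_cast h)]
      have hg : pvGcount n = 1 := by rw [pvGcount]; simp [show n < 128 by omega]
      have hn : n &&& 127 = n := by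
        rw [show (127:Nat) = 2 ^ 7 - 1 by norm_num, Nat.and_two_pow_sub_one_eq_mod,
          Nat.mod_eq_of_lt (by omega)]
      have hb : PySem.Int.bor (n : Int) (m : Int) = ((n ||| m : Nat) : Int) :=
        PySem.Int.bor_natCast n m
      rw [hb, hg]
      simp [pvCanon, pvGrp_zero, hn]

-- Python's bit_length drops by 7 under >> 7 (for n ≥ 128)
lemma pvBitLength_shift7 (n : Nat) (h : 128 ≤ n) :
    PySem.Int.bitLength (n : Int) = PySem.Int.bitLength ((n >>> 7 : Nat) : Int) + 7 := by
  have hd : n >>> 7 = n / 128 := by rw [Nat.shiftRight_eq_div_pow]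
  rw [hd,
    PySem.Int.bitLength_natCast (show 0 < n by omega),
    PySem.Int.bitLength_natCast (show 0 < n / 2 by omega),
    PySem.Int.bitLength_natCast (show 0 < n / 2 / 2 by omega),
    PySem.Int.bitLength_natCast (show 0 < n / 2 / 2 / 2 by omega),
    PySem.Int.bitLength_natCast (show 0 < n / 2 / 2 / 2 / 2 by omega),
    PySem.Int.bitLength_natCast (show 0 < n / 2 / 2 / 2 / 2 / 2 by omega),
    PySem.Int.bitLength_natCast (show 0 < n / 2 / 2 / 2 / 2 / 2 / 2 by omega)]
  have : n / 2 / 2 / 2 / 2 / 2 / 2 / 2 = n / 128 := by omega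
  rw [this]

-- B's precomputed group count equals A's loop count
lemma pvGcount_eq_bitLength (n : Nat) (h : 1 ≤ n) :
    pvGcount n = (PySem.Int.bitLength (n : Int) + 6) / 7 := by
  induction n using Nat.strong_induction_on with
  | _ n ih =>
    by_cases h128 : n < 128
    · have hg : pvGcount n = 1 := by rw [pvGcount]; simp [h128]
      have hub : PySem.Int.bitLength (n : Int) ≤ 7 := by
        by_contra hc
        have h8 : 8 ≤ PySem.Int.bitLength (n : Int) := by omega
        have := PySem.Int.two_pow_bitLength_le (n : Int) (Int.natCast_ne_zero.mpr (by omega))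
        have hle : (2:Nat) ^ 7 ≤ 2 ^ (PySem.Int.bitLength (n : Int) - 1) :=
          Nat.pow_le_pow_right (by norm_num) (by omega)
        have hna : (n : Int).natAbs = n := Int.natAbs_natCast n
        omega
      have hlb : 1 ≤ PySem.Int.bitLength (n : Int) := by
        by_contra hc
        have h0 : PySem.Int.bitLength (n : Int) = 0 := by omega
        have := PySem.Int.lt_two_pow_bitLength (n : Int)
        rw [h0] at this
        have hna : (n : Int).natAbs = n := Int.natAbs_natCast n
        simp [hna] at this
        omega
      omega
    · have hg : pvGcount n = pvGcount (n >>> 7) + 1 := by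
        rw [pvGcount]; simp [h128]
      have hd : n >>> 7 = n / 128 := by rw [Nat.shiftRight_eq_div_pow]
      have hlt : n >>> 7 < n := by omega
      have hpos : 1 ≤ n >>> 7 := by omega
      rw [hg, ih _ hlt hpos, pvBitLength_shift7 n (by omega)]
      omega

-- folding append over a list is map
lemma pvFoldl_append {α β : Type} (l : List α) (f : α → β) (init : List β) :
    l.foldl (fun acc i => acc ++ [f i]) init = init ++ l.map f := by
  induction l generalizing init with
  | nil => simp
  | cons a t iht => simp [List.foldl_cons, iht]

-- B's body, for n ≥ 128, is the canonical list with lowest mask 0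
lemma pvAlt_eq (n : Nat) (h : 128 ≤ n) :
    encode_variable_length_quantity_alt (n : Int) = pvCanon n (pvGcount n) 0 := by
  unfold encode_variable_length_quantity_alt
  rw [if_neg (by exact_mod_cast (show ¬ (n:Int) < 128 by exact_mod_cast not_lt.mpr (show (128:Int) ≤ n by exact_mod_cast h)))]
  have hnb : PySem.Int.floordiv ((PySem.Int.bitLength (n:Int) : Int) + 6) 7
      = ((pvGcount n : Nat) : Int) := by
    rw [pvGcount_eq_bitLength n (by omega)]
    simp [PySem.Int.floordiv, Int.fdiv_eq_ediv]
  simp only [hnb]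
  set k := pvGcount n with hk
  have hk1 : 1 ≤ k := by rw [hk, pvGcount]; split <;> omega
  rw [PySem.List.pyRange_neg_one ((k:Int) - 1) (-1)]
  have hcnt : (((k:Int) - 1) - (-1)).toNat = k := by omega
  rw [hcnt, List.foldl_map, pvFoldl_append]
  simp only [List.nil_append]
  unfold pvCanon
  apply List.ext_getElem
  · simp
  · intro j hj1 hj2
    simp only [List.length_map, List.length_range] at hj1 hj2
    have hjk : j < k := by simpa using hj2
    simp only [List.getElem_map, List.getElem_range, List.getElem_reverse, List.length_range]
    have hi : ((k:Int) - 1) - (j:Int) = ((k - 1 - j : Nat) : Int) := by omega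
    set i := k - 1 - j with hidef
    rw [hi]
    have h7 : (((7:Int) * (i:Int)).toNat) = 7 * i := by omega
    have hsh : (n : Int) >>> (((7 * i : Nat) : Int)) = ((n >>> (7 * i) : Nat) : Int) := by
      cases h : 7 * i with
      | zero => rfl
      | succ t => rfl
    have hband : PySem.Int.band ((n >>> (7 * i) : Nat) : Int) 0x7F
        = (((n >>> (7 * i)) &&& 127 : Nat) : Int) := by
      have := PySem.Int.band_natCast (n >>> (7 * i)) 127
      simpa using this
    rw [h7, hsh, hband]
    by_cases hi0 : i = 0
    · rw [if_neg (by simp [hi0]), if_pos hi0]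
      simp only [PySem.Int.bor_zero, pvGrp, Nat.or_zero]
    · rw [if_pos (by exact_mod_cast hi0), if_neg hi0]
      have := PySem.Int.bor_natCast ((n >>> (7 * i)) &&& 127) 128
      simpa [pvGrp] using this

-- ===== VERDICT (by name: the statement is the Claim_ definition above) =====
theorem encode_variable_length_quantity_spec : Claim_equal_encode_variable_length_quantity := by
  intro v _
  unfold Spec_encode_variable_length_quantity encode_variable_length_quantity
  by_cases hv : v < 128
  · rw [pvEvlqLoop, dif_neg (by omega)]
    unfold encode_variable_length_quantity_alt
    rw [if_pos (by exact_mod_cast hv)]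
    simp [PySem.Int.bor_zero]
  · have hn : v = ((v.toNat : Nat) : Int) := by omega
    have h128 : 128 ≤ v.toNat := by omega
    rw [hn, show ((0x00:Int)) = ((0:Nat):Int) by norm_num,
      pvEvlqLoop_eq v.toNat 0 [], pvAlt_eq v.toNat h128]
    simp
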